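-- pv_equiv track=rewrite | github.com/huangyuan666/security | SOME Pyfile/SQLMAP_passdog.py | tamper
-- ===== SOURCE A (Python) =====
-- def tamper(payload, **kwargs):
--
--
--
--     retVal = ""
--
--
--
--     if payload:
--
--         for i in range(len(payload)):
--
--             if payload[i].isspace():
--
--                 retVal += "/*0a**/"
--
--             elif payload[i] == '#' or payload[i:i + 3] == '-- ':
--
--                 retVal += payload[i:]
--
--                 break
--
--             else:
--
--                 retVal += payload[i]
--
--
--
--     return retVal
-- ===== SOURCE B (Python) =====
-- def tamper(payload, **kwargs):
--     h = payload.find('#')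
--     d = payload.find('-- ')
--     cands = [i for i in [h, d] if i != -1]
--     cut = min(cands) if cands else len(payload)
--     head = ''.join('/*0a**/' if c.isspace() else c for c in payload[:cut])
--     return head + payload[cut:]
-- ===== Notes on version B (the rewrite author's own statement) =====
-- stated objective: faster
-- what changed: B replaces A's single char-by-char break-on-marker loop (with quadratic string +=) by computing the earliest comment-marker cut point via str.find, transforming only the prefix with one join, and copying the suffix verbatim.
import Mathlib
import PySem

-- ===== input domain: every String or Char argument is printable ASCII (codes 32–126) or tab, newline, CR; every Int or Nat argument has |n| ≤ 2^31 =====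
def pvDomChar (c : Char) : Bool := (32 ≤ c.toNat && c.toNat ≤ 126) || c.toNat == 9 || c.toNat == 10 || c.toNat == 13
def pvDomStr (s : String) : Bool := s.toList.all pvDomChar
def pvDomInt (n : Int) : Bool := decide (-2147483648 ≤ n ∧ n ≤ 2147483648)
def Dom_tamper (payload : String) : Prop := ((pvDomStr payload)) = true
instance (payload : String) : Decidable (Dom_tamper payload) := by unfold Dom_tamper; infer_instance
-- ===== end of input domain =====

-- B replaces A's single break-on-marker loop by: find the earliest '#'/'-- ' cut point with
-- str.find, transform only the prefix, copy the suffix verbatim (objective: alternative).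

-- ===== PORT A =====
-- A's for-loop with break, as suffix recursion: payload[i:] is the current suffix.
def tamperGo : List Char → List Char
  | [] => []
  | c :: rest =>
    if PySem.Chars.isspace c then "/*0a**/".toList ++ tamperGo rest
    else if c = '#' ∨ List.take 3 (c :: rest) = "-- ".toList then c :: rest
    else c :: tamperGo rest

def tamper (payload : String) : String :=
  if payload = "" then "" else String.ofList (tamperGo payload.toList)

-- ===== PORT B =====
-- the generator's per-char expression: '/*0a**/' if c.isspace() else c
def tamperExpand (c : Char) : List Char :=
  if PySem.Chars.isspace c then "/*0a**/".toList else [c]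

def tamper_alt (payload : String) : String :=
  let h := PySem.Str.find payload "#"
  let d := PySem.Str.find payload "-- "
  let cands := List.filter (fun i => i != -1) [h, d]
  let cut : Int :=
    match PySem.List.min? cands id with
    | some m => m
    | none => PySem.Str.len payload
  let head := ((PySem.Str.slice payload none (some cut)).toList.map tamperExpand).flatten
  String.ofList (head ++ (PySem.Str.slice payload (some cut) none).toList)

-- ===== PRECONDITION & SPEC =====
def Spec_tamper (payload : String) (out : String) : Prop := out = tamper_alt payload
instance (payload : String) (out : String) : Decidable (Spec_tamper payload out) := by unfold Spec_tamper; infer_instance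

-- ===== CLAIM (what is proved, stated in full; the proofs are below) =====
def Claim_equal_tamper : Prop := ∀ (payload : String), Dom_tamper payload → Spec_tamper payload (tamper payload)

-- ===== LEMMAS AND PROOFS =====

-- a break marker starts at this suffix
def markerAt (s : List Char) : Prop := ['#'] <+: s ∨ ['-','-',' '] <+: s

-- number of characters A transforms before the break (= len if no break)
def firstMark : List Char → Nat
  | [] => 0
  | c :: rest =>
    if PySem.Chars.isspace c then 1 + firstMark rest
    else if c = '#' ∨ List.take 3 (c :: rest) = "-- ".toList then 0
    else 1 + firstMark rest

lemma isspace_not_marker (c : Char) (h : PySem.Chars.isspace c = true) : c ≠ '#' ∧ c ≠ '-' := by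
  constructor <;> rintro rfl <;> exact absurd h (by decide)

lemma breakcond_iff (c : Char) (rest : List Char) :
    (c = '#' ∨ List.take 3 (c :: rest) = "-- ".toList) ↔ markerAt (c :: rest) := by
  unfold markerAt
  constructor
  · rintro (rfl | h)
    · exact Or.inl (by simp [List.cons_prefix_cons])
    · exact Or.inr (by rw [List.prefix_iff_eq_take]; exact h.symm)
  · rintro (h | h)
    · exact Or.inl ((List.cons_prefix_cons.mp h).1.symm)
    · exact Or.inr ((List.prefix_iff_eq_take.mp h).symm)

lemma tamperGo_eq (cs : List Char) :
    tamperGo cs = ((cs.take (firstMark cs)).map tamperExpand).flatten ++ cs.drop (firstMark cs) := by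
  induction cs with
  | nil => rfl
  | cons c rest ih =>
    by_cases hs : PySem.Chars.isspace c
    · simp [tamperGo, firstMark, hs, Nat.add_comm 1 (firstMark rest), tamperExpand, ih]
    · by_cases hb : c = '#' ∨ List.take 3 (c :: rest) = "-- ".toList
      · have hb' : c = '#' ∨ c = '-' ∧ List.take 2 rest = ['-',' '] := by simpa using hb
        simp [tamperGo, firstMark, hs, hb']
      · have hb' : ¬(c = '#' ∨ c = '-' ∧ List.take 2 rest = ['-',' ']) := by simpa using hb
        simp [tamperGo, firstMark, hs, hb', Nat.add_comm 1 (firstMark rest), tamperExpand, ih]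

lemma firstMark_eq (cs : List Char) (n : Nat)
    (hlt : ∀ j < n, ¬ markerAt (cs.drop j))
    (hn : markerAt (cs.drop n) ∨ n = cs.length) :
    firstMark cs = n := by
  induction cs generalizing n with
  | nil =>
    rcases hn with h | h
    · exact absurd h (by simp [markerAt])
    · simp [firstMark, h]
  | cons c rest ih =>
    cases n with
    | zero =>
      have hm : markerAt (c :: rest) := by
        rcases hn with h | h
        · simpa using h
        · exact absurd h.symm (by simp)
      have hb := (breakcond_iff c rest).mpr hm
      have hs : PySem.Chars.isspace c = false := by
        by_contra h
        have h' := isspace_not_marker c (by simpa using h)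
        rcases hm with hp | hp
        · exact h'.1 ((List.cons_prefix_cons.mp hp).1.symm)
        · exact h'.2 ((List.cons_prefix_cons.mp hp).1.symm)
      have hb' : c = '#' ∨ c = '-' ∧ List.take 2 rest = ['-',' '] := by simpa using hb
      simp [firstMark, hs, hb']
    | succ m =>
      have h0 : ¬ (c = '#' ∨ List.take 3 (c :: rest) = "-- ".toList) := by
        rw [breakcond_iff]
        exact hlt 0 (Nat.succ_pos m)
      have hrec : firstMark rest = m := by
        apply ih
        · intro j hj
          have := hlt (j + 1) (by omega)
          simpa using this
        · rcases hn with h | h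
          · exact Or.inl (by simpa using h)
          · exact Or.inr (by simpa using h)
      have h0' : ¬(c = '#' ∨ c = '-' ∧ List.take 2 rest = ['-',' ']) := by simpa using h0
      by_cases hs : PySem.Chars.isspace c <;> simp [firstMark, hs, h0', hrec, Nat.add_comm]

lemma no_occ (cs sub : List Char) (h : PySem.Chars.find cs sub = -1) :
    ∀ j, ¬ sub <+: cs.drop j := by
  intro j hj
  have hin : PySem.Chars.isIn sub cs = true :=
    (PySem.Chars.exists_prefix_drop_iff_isIn sub cs).mp ⟨j, hj⟩
  exact (PySem.Chars.find_eq_neg_one_iff cs sub).mp h ((PySem.Chars.isIn_iff_infix sub cs).mp hin)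

-- the B-side cut index equals the number of characters A transforms
lemma cut_eq_firstMark (cs : List Char) :
    (match PySem.List.min?
        (List.filter (fun i => i != -1)
          [PySem.Chars.find cs ['#'], PySem.Chars.find cs ['-','-',' ']]) id with
      | some m => m
      | none => (cs.length : Int)) = (firstMark cs : Int) := by
  set F1 := PySem.Chars.find cs ['#'] with hF1def
  set F2 := PySem.Chars.find cs ['-','-',' '] with hF2def
  by_cases h1 : F1 = -1 <;> by_cases h2 : F2 = -1
  · -- no marker anywhere: cut = len
    have hfm : firstMark cs = cs.length := by
      apply firstMark_eq
      · intro j _ hm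
        rcases hm with hp | hp
        · exact no_occ cs ['#'] h1 j hp
        · exact no_occ cs ['-','-',' '] h2 j hp
      · exact Or.inr rfl
    simp [h1, h2, PySem.List.min?, hfm]
  · -- only '-- ' occurs
    have h2n : 0 ≤ F2 := by
      have := PySem.Chars.neg_one_le_find cs ['-','-',' ']
      rw [← hF2def] at this; omega
    have hspec := PySem.Chars.find_spec (s := cs) (sub := ['-','-',' ']) (by rw [← hF2def]; exact h2n)
    rw [← hF2def] at hspec
    have hfm : firstMark cs = F2.toNat := by
      apply firstMark_eq
      · intro j hj hm
        rcases hm with hp | hp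
        · exact no_occ cs ['#'] h1 j hp
        · exact hspec.2 j hj hp
      · exact Or.inl (Or.inr hspec.1)
    simp [h1, h2, PySem.List.min?, hfm, Int.toNat_of_nonneg h2n]
  · -- only '#' occurs
    have h1n : 0 ≤ F1 := by
      have := PySem.Chars.neg_one_le_find cs ['#']
      rw [← hF1def] at this; omega
    have hspec := PySem.Chars.find_spec (s := cs) (sub := ['#']) (by rw [← hF1def]; exact h1n)
    rw [← hF1def] at hspec
    have hfm : firstMark cs = F1.toNat := by
      apply firstMark_eq
      · intro j hj hm
        rcases hm with hp | hp
        · exact hspec.2 j hj hp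
        · exact no_occ cs ['-','-',' '] h2 j hp
      · exact Or.inl (Or.inl hspec.1)
    simp [h1, h2, PySem.List.min?, hfm, Int.toNat_of_nonneg h1n]
  · -- both occur: cut = min
    have h1n : 0 ≤ F1 := by
      have := PySem.Chars.neg_one_le_find cs ['#']
      rw [← hF1def] at this; omega
    have h2n : 0 ≤ F2 := by
      have := PySem.Chars.neg_one_le_find cs ['-','-',' ']
      rw [← hF2def] at this; omega
    have hspec1 := PySem.Chars.find_spec (s := cs) (sub := ['#']) (by rw [← hF1def]; exact h1n)
    have hspec2 := PySem.Chars.find_spec (s := cs) (sub := ['-','-',' ']) (by rw [← hF2def]; exact h2n)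
    rw [← hF1def] at hspec1
    rw [← hF2def] at hspec2
    by_cases hlt : F2 < F1
    · have hfm : firstMark cs = F2.toNat := by
        apply firstMark_eq
        · intro j hj hm
          rcases hm with hp | hp
          · exact hspec1.2 j (by omega) hp
          · exact hspec2.2 j hj hp
        · exact Or.inl (Or.inr hspec2.1)
      simp [h1, h2, PySem.List.min?, hlt, hfm, Int.toNat_of_nonneg h2n]
    · have hfm : firstMark cs = F1.toNat := by
        apply firstMark_eq
        · intro j hj hm
          rcases hm with hp | hp
          · exact hspec1.2 j hj hp
          · exact hspec2.2 j (by omega) hp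
        · exact Or.inl (Or.inl hspec1.1)
      simp [h1, h2, PySem.List.min?, hlt, hfm, Int.toNat_of_nonneg h1n]

lemma tamper_alt_eq (payload : String) :
    tamper_alt payload =
      String.ofList (((payload.toList.take (firstMark payload.toList)).map tamperExpand).flatten
        ++ payload.toList.drop (firstMark payload.toList)) := by
  unfold tamper_alt
  simp only [PySem.Str.find_eq, PySem.Str.toList_slice, PySem.Chars.slice_eq_listSlice]
  have hsub1 : ("#".toList : List Char) = ['#'] := by decide
  have hsub2 : ("-- ".toList : List Char) = ['-','-',' '] := by decide
  have hlen : PySem.Str.len payload = (payload.toList.length : Int) := by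
    simp [PySem.Str.len_eq]
  rw [hsub1, hsub2, hlen, cut_eq_firstMark]
  rw [PySem.List.slice_to_natCast, PySem.List.slice_from_natCast]

-- ===== VERDICT (by name: the statement is the Claim_ definition above) =====
theorem tamper_spec : Claim_equal_tamper := by
  intro payload _
  unfold Spec_tamper tamper
  rw [tamper_alt_eq]
  by_cases h : payload = ""
  · subst h; decide
  · rw [if_neg h, tamperGo_eq]
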